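-- pv_equiv track=rewrite | github.com/anonymweblinks/GET | src/warmStart.py | get_nodes_id
-- ===== SOURCE A (Python) =====
-- def get_nodes_id(ind, Hind):
--     ind -= 1                  # index starts from 0
--     branchNodes = [ind]
--     current_nodes = [ind]
--     for _ in range(Hind-1):
--         next_nodes = [2*node + j for node in current_nodes for j in [1, 2]]
--         branchNodes.extend(next_nodes)
--         current_nodes = next_nodes
--     leftLeaf = 2*(ind+1) if Hind == 1 else 2*(next_nodes[0]+1)      # read index start from 1. eg, 32 means the 32th node, the first leaf node and index should be 31
--     return branchNodes, leftLeaf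
-- ===== SOURCE B (Python) =====
-- def get_nodes_id(ind, Hind):
--     ind -= 1                  # index starts from 0
--     branchNodes = []
--     for d in range(Hind):
--         start = (ind + 1) * 2**d - 1          # first node (0-based) of depth-d level
--         branchNodes.extend(range(start, start + 2**d))
--     leftLeaf = (ind + 1) * 2**Hind            # closed form for the first leaf (1-based)
--     return branchNodes, leftLeaf
-- ===== Notes on version B (the rewrite author's own statement) =====
-- stated objective: simpler
-- what changed: B emits each depth's nodes directly as one contiguous arithmetic range per level and computes the first leaf by the closed form (ind)*2**Hind, instead of A's repeated frontier-to-children mapping; Pre_ excludes Hind <= 0, where A raises NameError (next_nodes never bound).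
import Mathlib
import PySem

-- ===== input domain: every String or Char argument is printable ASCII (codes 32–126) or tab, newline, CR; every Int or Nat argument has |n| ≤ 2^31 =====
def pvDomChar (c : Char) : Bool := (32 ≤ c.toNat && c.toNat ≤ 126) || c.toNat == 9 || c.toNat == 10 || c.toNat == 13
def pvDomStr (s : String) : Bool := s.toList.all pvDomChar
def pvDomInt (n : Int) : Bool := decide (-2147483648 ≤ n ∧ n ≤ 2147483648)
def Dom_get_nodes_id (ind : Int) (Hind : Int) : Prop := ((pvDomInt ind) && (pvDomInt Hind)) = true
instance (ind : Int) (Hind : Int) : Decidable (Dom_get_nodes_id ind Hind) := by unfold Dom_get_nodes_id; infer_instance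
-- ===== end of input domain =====

-- B replaces A's frontier-to-children iteration by emitting each level's contiguous
-- index block directly and computes the first leaf by a closed form (objective: simpler).

-- ===== PORT A =====
-- A's loop body: state is (branchNodes, current_nodes, next_nodes?); next_nodes is none
-- until the body has run once (reading it then is Python's NameError — excluded by Pre_).
def pvStepA (s : List Int × List Int × Option (List Int)) :
    List Int × List Int × Option (List Int) :=
  let next := s.2.1.flatMap (fun node => [2 * node + 1, 2 * node + 2])
  (s.1 ++ next, next, some next)

def get_nodes_id (ind : Int) (Hind : Int) : List Int × Int :=
  let ind := ind - 1
  let st := (PySem.List.pyRange 0 (Hind - 1) 1).foldl (fun s _ => pvStepA s) ([ind], [ind], none)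
  let leftLeaf : Int :=
    if Hind == 1 then 2 * (ind + 1)
    else
      match st.2.2 with
      | some ns => 2 * (PySem.List.pyGetD ns 0 0 + 1)   -- next_nodes[0]; never empty when bound
      | none => 0                                       -- NameError in Python: outside Pre_
  (st.1, leftLeaf)

-- ===== PORT B =====
def get_nodes_id_alt (ind : Int) (Hind : Int) : List Int × Int :=
  let ind := ind - 1
  let branchNodes :=
    (PySem.List.pyRange 0 Hind 1).foldl
      (fun (acc : List Int) d =>
        let start := (ind + 1) * 2 ^ d.toNat - 1
        acc ++ PySem.List.pyRange start (start + 2 ^ d.toNat) 1)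
      []
  (branchNodes, (ind + 1) * 2 ^ Hind.toNat)

-- ===== PRECONDITION & SPEC =====
-- Pre_ excludes exactly Hind ≤ 0, where A raises NameError (next_nodes is never bound).
def Pre_get_nodes_id (ind : Int) (Hind : Int) : Prop := 1 ≤ Hind
instance (ind : Int) (Hind : Int) : Decidable (Pre_get_nodes_id ind Hind) := by
  unfold Pre_get_nodes_id; infer_instance
def pvWitness_get_nodes_id : Int × Int := (4, 3)

def Spec_get_nodes_id (ind : Int) (Hind : Int) (out : List Int × Int) : Prop := out = get_nodes_id_alt ind Hind
instance (ind : Int) (Hind : Int) (out : List Int × Int) : Decidable (Spec_get_nodes_id ind Hind out) := by unfold Spec_get_nodes_id; infer_instance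

-- ===== CLAIM (what is proved, stated in full; the proofs are below) =====
def Claim_equal_get_nodes_id : Prop := ∀ (ind : Int) (Hind : Int), Dom_get_nodes_id ind Hind → Pre_get_nodes_id ind Hind → Spec_get_nodes_id ind Hind (get_nodes_id ind Hind)

-- ===== LEMMAS AND PROOFS =====

-- Depth-d level of the subtree rooted at r (0-based): 2^d consecutive node ids.
def pvLevel (r : Int) (d : Nat) : List Int :=
  (List.range (2 ^ d)).map (fun i => (r + 1) * 2 ^ d - 1 + Int.ofNat i)

def pvConcatLevels (r : Int) (n : Nat) : List Int :=
  (List.range n).flatMap (pvLevel r)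

theorem pvFlatMap_pair (f : Nat → Int) (n : Nat) :
    (List.range n).flatMap (fun i => [f (2 * i), f (2 * i + 1)]) = (List.range (2 * n)).map f := by
  induction n with
  | zero => simp
  | succ n ih =>
    have h2 : 2 * (n + 1) = (2 * n + 1) + 1 := by omega
    rw [List.range_succ, List.flatMap_append, ih, h2, List.range_succ, List.range_succ]
    simp

theorem pvChildren_level (r : Int) (d : Nat) :
    (pvLevel r d).flatMap (fun node => [2 * node + 1, 2 * node + 2]) = pvLevel r (d + 1) := by
  unfold pvLevel
  rw [List.flatMap_map,
      show (2 : Nat) ^ (d + 1) = 2 * 2 ^ d by rw [pow_succ]; omega,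
      ← pvFlatMap_pair (fun j => (r + 1) * 2 ^ (d + 1) - 1 + Int.ofNat j) (2 ^ d)]
  congr 1
  funext i
  have e1 : 2 * ((r + 1) * 2 ^ d - 1 + Int.ofNat i) + 1
      = (r + 1) * 2 ^ (d + 1) - 1 + Int.ofNat (2 * i) := by
    simp [Int.ofNat_eq_natCast]
    ring
  have e2 : 2 * ((r + 1) * 2 ^ d - 1 + Int.ofNat i) + 2
      = (r + 1) * 2 ^ (d + 1) - 1 + Int.ofNat (2 * i + 1) := by
    simp [Int.ofNat_eq_natCast]
    ring
  rw [e1, e2]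

theorem pvConcatLevels_succ (r : Int) (n : Nat) :
    pvConcatLevels r (n + 1) = pvConcatLevels r n ++ pvLevel r n := by
  unfold pvConcatLevels
  rw [List.range_succ, List.flatMap_append]
  simp

theorem pvLevel_head (r : Int) (d : Nat) :
    PySem.List.pyGetD (pvLevel r d) 0 0 = (r + 1) * 2 ^ d - 1 := by
  unfold pvLevel
  rw [show (2 : Nat) ^ d = (2 ^ d - 1) + 1 by have := Nat.one_le_two_pow (n := d); omega,
      List.range_succ_eq_map]
  simp [PySem.List.pyGetD, PySem.List.pyGet?, PySem.List.pyIdx?]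

-- A's loop invariant: after n iterations branchNodes holds levels 0..n and
-- current/next hold level n.
theorem pvInvA (r : Int) (n : Nat) :
    (List.range n).foldl (fun s (_ : Nat) => pvStepA s) ([r], [r], none)
    = (pvConcatLevels r (n + 1), pvLevel r n,
       if n = 0 then none else some (pvLevel r n)) := by
  induction n with
  | zero =>
    simp [pvConcatLevels, pvLevel]
  | succ n ih =>
    rw [List.range_succ, List.foldl_append, ih]
    simp only [List.foldl_cons, List.foldl_nil, pvStepA]
    rw [pvChildren_level, ← pvConcatLevels_succ]
    simp

-- B's fold builds the same concatenation of levels.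
theorem pvInvB (r : Int) (H : Int) :
    (PySem.List.pyRange 0 H 1).foldl
      (fun (acc : List Int) d =>
        acc ++ PySem.List.pyRange ((r + 1) * 2 ^ d.toNat - 1)
                 ((r + 1) * 2 ^ d.toNat - 1 + 2 ^ d.toNat) 1)
      []
    = pvConcatLevels r H.toNat := by
  rw [PySem.List.foldl_append_eq_flatMap, PySem.List.pyRange_one, List.flatMap_map]
  unfold pvConcatLevels
  rw [Int.sub_zero, List.nil_append]
  congr 1
  funext k
  rw [show ((0 : Int) + (k : Int)).toNat = k by omega, PySem.List.pyRange_one]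
  unfold pvLevel
  rw [show ((r + 1) * 2 ^ k - 1 + 2 ^ k - ((r + 1) * 2 ^ k - 1)).toNat = 2 ^ k by
        have hc : ((2 : Int) ^ k) = ((2 ^ k : Nat) : Int) := by exact_mod_cast rfl
        have hp : (0 : Nat) < 2 ^ k := Nat.two_pow_pos k
        omega]
  simp [Int.ofNat_eq_natCast]

-- ===== VERDICT (by name: the statement is the Claim_ definition above) =====
theorem get_nodes_id_spec : Claim_equal_get_nodes_id := by
  intro ind Hind _hdom hpre
  have h1 : (1 : Int) ≤ Hind := hpre
  unfold Spec_get_nodes_id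
  simp only [get_nodes_id, get_nodes_id_alt]
  rw [pvInvB (ind - 1) Hind]
  rw [PySem.List.pyRange_one, List.foldl_map, pvInvA (ind - 1) ((Hind - 1 - 0).toNat)]
  have hn : (Hind - 1 - 0).toNat + 1 = Hind.toNat := by omega
  refine Prod.ext ?_ ?_
  · simpa using congrArg (pvConcatLevels (ind - 1)) hn
  · simp only []
    by_cases hH : Hind = 1
    · subst hH
      norm_num
      ring
    · have hne : (Hind == 1) = false := by simp [hH]
      have hne0 : (Hind - 1 - 0).toNat ≠ 0 := by omega
      simp only [hne, Bool.false_eq_true, if_false, hne0, pvLevel_head]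
      have hpow : (2 : Int) ^ Hind.toNat = 2 ^ ((Hind - 1 - 0).toNat) * 2 := by
        rw [← hn, pow_succ]
      rw [hpow]
      ring
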